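-- pv_equiv track=rewrite | github.com/ElliottSax/engineer | training_iterations/training_iteration118.py | euclid_game_winner
-- ===== SOURCE A (Python) =====
-- def euclid_game_winner(a, b):
--     """Euclid's Game: subtract k*smaller from larger (k>=1).
--     Return True if first player wins."""
--     if a < b:
--         a, b = b, a
--
--     if b == 0:
--         return False  # Game over, previous player won
--
--     # If a >= 2*b, first player can always choose to win
--     # Otherwise, depends on recursion
--     turn = 0  # 0 = first player's turn
--     while b > 0:
--         if a >= 2 * b:
--             # Current player can choose to leave opponent in any position
--             # They can win by choosing appropriately
--             return turn == 0
--         a, b = b, a - b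
--         turn = 1 - turn
--
--     return turn == 1
-- ===== SOURCE B (Python) =====
-- def euclid_game_winner(a, b):
--     """Euclid's Game: recursive decomposition threading the player-to-move
--     as a boolean accumulator instead of mutating loop variables."""
--     def go(x, y, first):
--         if y <= 0:
--             return not first
--         if x >= 2 * y:
--             return first
--         return go(y, x - y, not first)
--     return go(max(a, b), min(a, b), True)
-- ===== Notes on version B (the rewrite author's own statement) =====
-- stated objective: alternative
-- what changed: Replaces the while-loop with mutable a/b/turn state and an early b==0 guard by a tail-recursive helper over the Euclidean reduction that threads the player-to-move as a boolean accumulator, with max/min replacing the swap and one unified y<=0 base case.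
import Mathlib
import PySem

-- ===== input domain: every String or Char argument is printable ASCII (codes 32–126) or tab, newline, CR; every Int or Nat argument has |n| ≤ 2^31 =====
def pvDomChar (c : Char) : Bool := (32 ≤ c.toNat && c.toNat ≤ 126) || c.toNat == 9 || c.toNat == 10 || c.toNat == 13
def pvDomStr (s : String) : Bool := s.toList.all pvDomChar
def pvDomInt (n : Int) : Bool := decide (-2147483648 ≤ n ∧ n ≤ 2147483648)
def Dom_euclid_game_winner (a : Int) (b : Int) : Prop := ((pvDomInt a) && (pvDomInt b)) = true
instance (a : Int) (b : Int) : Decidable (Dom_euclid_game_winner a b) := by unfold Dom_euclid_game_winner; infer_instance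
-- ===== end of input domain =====

-- B replaces A's while-loop with mutable a/b/turn and early b==0 guard by a
-- tail-recursive helper threading the player-to-move as a boolean accumulator (alternative decomposition).


-- ===== PORT A =====
-- A's while-loop: state (a, b, turn); returns `turn == 0` when a ≥ 2b, `turn == 1` when the loop exits.
def euclidLoopA (a b turn : Int) : Bool :=
  if b > 0 then
    if a ≥ 2 * b then turn == 0
    else euclidLoopA b (a - b) (1 - turn)
  else turn == 1
termination_by b.toNat
decreasing_by omega

def euclid_game_winner (a : Int) (b : Int) : Bool :=
  let p := if a < b then (b, a) else (a, b)
  if p.2 == 0 then false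
  else euclidLoopA p.1 p.2 0

-- ===== PORT B =====
-- B's recursive helper: `first` is the boolean "first player to move" accumulator.
def euclidGoB (x y : Int) (first : Bool) : Bool :=
  if y ≤ 0 then !first
  else if x ≥ 2 * y then first
  else euclidGoB y (x - y) (!first)
termination_by y.toNat
decreasing_by omega

def euclid_game_winner_alt (a : Int) (b : Int) : Bool :=
  euclidGoB (max a b) (min a b) true

-- ===== PRECONDITION & SPEC =====
def Spec_euclid_game_winner (a : Int) (b : Int) (out : Bool) : Prop := out = euclid_game_winner_alt a b
instance (a : Int) (b : Int) (out : Bool) : Decidable (Spec_euclid_game_winner a b out) := by unfold Spec_euclid_game_winner; infer_instance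

-- ===== CLAIM (what is proved, stated in full; the proofs are below) =====
def Claim_equal_euclid_game_winner : Prop := ∀ (a : Int) (b : Int), Dom_euclid_game_winner a b → Spec_euclid_game_winner a b (euclid_game_winner a b)

-- ===== LEMMAS AND PROOFS =====

-- A's loop agrees with B's helper when the Int turn counter is 0 or 1,
-- under the correspondence first = (turn == 0).
lemma loop_eq_go : ∀ (n : ℕ) (a b turn : Int), b.toNat ≤ n → (turn = 0 ∨ turn = 1) →
    euclidLoopA a b turn = euclidGoB a b (decide (turn = 0)) := by
  intro n
  induction n with
  | zero =>
    intro a b turn hb ht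
    rw [euclidLoopA, euclidGoB]
    rw [if_neg (show ¬ b > 0 by omega), if_pos (show b ≤ 0 by omega)]
    rcases ht with h | h <;> simp [h]
  | succ n ih =>
    intro a b turn hb ht
    rw [euclidLoopA, euclidGoB]
    by_cases hpos : b > 0
    · simp only [hpos, if_pos, show ¬ b ≤ 0 by omega, if_neg, not_false_iff]
      by_cases hge : a ≥ 2 * b
      · simp [hge]
        rcases ht with h | h <;> simp [h]
      · simp only [hge, if_neg, not_false_iff]
        have h1 : (1 - turn = 0 ∨ 1 - turn = 1) := by omega
        have h2 : (a - b).toNat ≤ n := by omega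
        rw [ih b (a - b) (1 - turn) h2 h1]
        congr 1
        rcases ht with h | h <;> simp [h]
    · have hle : b ≤ 0 := by omega
      simp only [hpos, if_neg, not_false_iff, hle, if_pos]
      rcases ht with h | h <;> simp [h]

-- ===== VERDICT (by name: the statement is the Claim_ definition above) =====
theorem euclid_game_winner_spec : Claim_equal_euclid_game_winner := by
  intro a b _
  unfold Spec_euclid_game_winner euclid_game_winner euclid_game_winner_alt
  have hmaxmin : (if a < b then (b, a) else (a, b)) = (max a b, min a b) := by
    by_cases h : a < b <;> simp [h, max_def, min_def] <;> omega
  rw [hmaxmin]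
  simp only
  by_cases hz : min a b = 0
  · simp [hz, euclidGoB]
  · have hz' : (min a b == 0) = false := by simp [hz]
    rw [hz']
    simp only [Bool.false_eq_true, if_neg, not_false_iff]
    rw [loop_eq_go (min a b).toNat (max a b) (min a b) 0 (le_refl _) (Or.inl rfl)]
    simp
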